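-- pv_equiv track=rewrite | github.com/holbizmetrics/prime-alphabet-finder | prime_encoder.py | dutch_number_word
-- ===== SOURCE A (Python) =====
-- def dutch_number_word(n: int) -> str:
--     """Convert number to Dutch words."""
--     if n == 0:
--         return "nul"
--
--     ones = ["", "een", "twee", "drie", "vier", "vijf", "zes", "zeven", "acht", "negen",
--             "tien", "elf", "twaalf", "dertien", "veertien", "vijftien", "zestien",
--             "zeventien", "achttien", "negentien"]
--     tens = ["", "", "twintig", "dertig", "veertig", "vijftig", "zestig", "zeventig", "tachtig", "negentig"]
--
--     if n < 20:
--         return ones[n]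
--     elif n < 100:
--         if n % 10 == 0:
--             return tens[n // 10]
--         connector = "ën" if n % 10 in [2, 3] else "en"
--         return ones[n % 10] + connector + tens[n // 10]
--     elif n < 1000:
--         prefix = "" if n // 100 == 1 else ones[n // 100]
--         return prefix + "honderd" + (dutch_number_word(n % 100) if n % 100 else "")
--     elif n < 1000000:
--         prefix = "" if n // 1000 == 1 else dutch_number_word(n // 1000)
--         return prefix + "duizend" + (dutch_number_word(n % 1000) if n % 1000 else "")
--     return str(n)
-- ===== SOURCE B (Python) =====
-- ONES = ["", "een", "twee", "drie", "vier", "vijf", "zes", "zeven", "acht", "negen",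
--         "tien", "elf", "twaalf", "dertien", "veertien", "vijftien", "zestien",
--         "zeventien", "achttien", "negentien"]
-- TENS = ["", "", "twintig", "dertig", "veertig", "vijftig", "zestig", "zeventig", "tachtig", "negentig"]
--
-- # Precomputed word table for 0..99, built once: removes all per-call connector/branch
-- # logic below 100 in favour of a single table lookup.
-- _SMALL = list(ONES)
-- for _t in range(2, 10):
--     _SMALL.append(TENS[_t])
--     for _u in range(1, 10):
--         _SMALL.append(ONES[_u] + ("ën" if _u in (2, 3) else "en") + TENS[_t])
--
--
-- def _group(x: int) -> str:
--     """Word for a three-digit group 0 <= x <= 999 ('' for 0); non-recursive."""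
--     h, r = divmod(x, 100)
--     hundreds = "" if h == 0 else ("" if h == 1 else ONES[h]) + "honderd"
--     return hundreds + ("" if r == 0 else _SMALL[r])
--
--
-- def dutch_number_word(n: int) -> str:
--     """Convert number to Dutch words."""
--     if n == 0:
--         return "nul"
--     if n < 0 or n >= 1000000:
--         return str(n)
--     q, r = divmod(n, 1000)
--     thousands = "" if q == 0 else ("" if q == 1 else _group(q)) + "duizend"
--     return thousands + ("" if r == 0 else _group(r))
-- ===== Notes on version B (the rewrite author's own statement) =====
-- stated objective: alternative
-- what changed: Replaces A's self-recursive branch logic by a 100-entry word table for 0-99 precomputed once at module load, plus a non-recursive three-digit group formatter and an explicit divmod(n,1000) split, so per-call there is no recursion and no connector branching below 100.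
-- intended difference: On the negative inputs Pre_ admits (-20 <= n <= -1), A returns an accidental word from negative-index wraparound into the ones table (e.g. 'negentien' for -1); B returns str(n), the intended fallback A itself uses for out-of-range magnitudes. — e.g. on dutch_number_word(-1): A returns "negentien", B returns "-1"
-- outside the precondition, e.g. on dutch_number_word(-21): A raises IndexError, B returns '-21'
import Mathlib
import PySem

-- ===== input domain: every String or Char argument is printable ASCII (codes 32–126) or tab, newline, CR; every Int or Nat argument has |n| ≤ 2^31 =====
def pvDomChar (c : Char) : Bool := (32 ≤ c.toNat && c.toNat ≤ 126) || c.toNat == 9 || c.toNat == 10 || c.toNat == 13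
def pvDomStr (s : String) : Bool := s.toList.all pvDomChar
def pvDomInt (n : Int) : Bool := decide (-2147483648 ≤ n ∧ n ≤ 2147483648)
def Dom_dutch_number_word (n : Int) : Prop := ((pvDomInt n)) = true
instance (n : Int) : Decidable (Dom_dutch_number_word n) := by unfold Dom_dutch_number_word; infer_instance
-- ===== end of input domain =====

-- B replaces A's self-recursive branch logic by a 0–99 word table precomputed once plus a
-- non-recursive three-digit group formatter over an explicit divmod(n,1000) split (objective:
-- alternative); on -20 ≤ n ≤ -1 A returns accidental wraparound words and B returns str(n).


-- ===== PORT A =====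
def onesA : List String := ["", "een", "twee", "drie", "vier", "vijf", "zes", "zeven", "acht", "negen",
  "tien", "elf", "twaalf", "dertien", "veertien", "vijftien", "zestien", "zeventien", "achttien", "negentien"]
def tensA : List String := ["", "", "twintig", "dertig", "veertig", "vijftig", "zestig", "zeventig", "tachtig", "negentig"]

def dutch_number_word (n : Int) : String :=
  if n = 0 then "nul"
  else if n < 20 then (PySem.List.pyGetD onesA n "")       -- ones[n]; IndexError (n ≤ -21) excluded by Pre_
  else if n < 100 then
    if PySem.Int.mod n 10 = 0 then (PySem.List.pyGetD tensA (PySem.Int.floordiv n 10) "")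
    else
      let connector := if PySem.Int.mod n 10 ∈ ([2, 3] : List Int) then "ën" else "en"
      (PySem.List.pyGetD onesA (PySem.Int.mod n 10) "") ++ connector ++ (PySem.List.pyGetD tensA (PySem.Int.floordiv n 10) "")
  else if n < 1000 then
    let pfx := if PySem.Int.floordiv n 100 = 1 then "" else (PySem.List.pyGetD onesA (PySem.Int.floordiv n 100) "")
    pfx ++ "honderd" ++ (if PySem.Int.mod n 100 ≠ 0 then dutch_number_word (PySem.Int.mod n 100) else "")
  else if n < 1000000 then
    let pfx := if PySem.Int.floordiv n 1000 = 1 then "" else dutch_number_word (PySem.Int.floordiv n 1000)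
    pfx ++ "duizend" ++ (if PySem.Int.mod n 1000 ≠ 0 then dutch_number_word (PySem.Int.mod n 1000) else "")
  else PySem.Int.toStr n
termination_by n.toNat
decreasing_by
  · have h1 := PySem.Int.mod_nonneg n (b := 100) (by norm_num)
    have h2 := PySem.Int.mod_lt n (b := 100) (by norm_num)
    omega
  · have := PySem.Int.floordiv_eq_ediv_of_pos (a := n) (b := 1000) (by norm_num)
    omega
  · have h1 := PySem.Int.mod_nonneg n (b := 1000) (by norm_num)
    have h2 := PySem.Int.mod_lt n (b := 1000) (by norm_num)
    omega

-- ===== PORT B =====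
def onesB : List String := ["", "een", "twee", "drie", "vier", "vijf", "zes", "zeven", "acht", "negen",
  "tien", "elf", "twaalf", "dertien", "veertien", "vijftien", "zestien", "zeventien", "achttien", "negentien"]
def tensB : List String := ["", "", "twintig", "dertig", "veertig", "vijftig", "zestig", "zeventig", "tachtig", "negentig"]

/-- Precomputed word table for 0..99, built once (the two Source B module-level loops). -/
def smallB : List String :=
  (PySem.List.pyRange 2 10 1).foldl (fun acc t =>
    (PySem.List.pyRange 1 10 1).foldl (fun acc u =>
      acc ++ [(PySem.List.pyGetD onesB u "") ++ (if u = 2 ∨ u = 3 then "ën" else "en") ++ (PySem.List.pyGetD tensB t "")])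
      (acc ++ [PySem.List.pyGetD tensB t ""]))
    onesB

/-- Word for a three-digit group 0 ≤ x ≤ 999 ("" for 0); non-recursive. -/
def groupB (x : Int) : String :=
  let h := PySem.Int.floordiv x 100
  let r := PySem.Int.mod x 100
  let hundreds := if h = 0 then "" else (if h = 1 then "" else PySem.List.pyGetD onesB h "") ++ "honderd"
  hundreds ++ (if r = 0 then "" else PySem.List.pyGetD smallB r "")

def dutch_number_word_alt (n : Int) : String :=
  if n = 0 then "nul"
  else if n < 0 ∨ 1000000 ≤ n then PySem.Int.toStr n
  else
    let q := PySem.Int.floordiv n 1000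
    let r := PySem.Int.mod n 1000
    let thousands := if q = 0 then "" else (if q = 1 then "" else groupB q) ++ "duizend"
    thousands ++ (if r = 0 then "" else groupB r)

-- ===== PRECONDITION & SPEC =====
-- Pre_ excludes only n ≤ -21, on which A raises IndexError (negative list index past the table).
def Pre_dutch_number_word (n : Int) : Prop := -20 ≤ n
instance (n : Int) : Decidable (Pre_dutch_number_word n) := by unfold Pre_dutch_number_word; infer_instance
def pvWitness_dutch_number_word : Int := 12345

-- On the negative inputs Pre_ admits, A returns an accidental word from Python's negative-index
-- wraparound into the ones table (e.g. 'negentien' for -1); B returns str(n), the intended fallback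
-- A itself uses for out-of-range magnitudes.
def D_dutch_number_word (n : Int) : Prop := -20 ≤ n ∧ n ≤ -1
instance (n : Int) : Decidable (D_dutch_number_word n) := by unfold D_dutch_number_word; infer_instance

def Spec_dutch_number_word (n : Int) (out : String) : Prop := ¬ D_dutch_number_word n → out = dutch_number_word_alt n
instance (n : Int) (out : String) : Decidable (Spec_dutch_number_word n out) := by unfold Spec_dutch_number_word; infer_instance

def pvDiffWitness_dutch_number_word : Int := -1
def pvDiffWitnessOut_dutch_number_word : String × String := ("negentien", "-1")

-- ===== CLAIM (what is proved, stated in full; the proofs are below) =====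
def Claim_unchanged_dutch_number_word : Prop := ∀ (n : Int), Dom_dutch_number_word n → Pre_dutch_number_word n → Spec_dutch_number_word n (dutch_number_word n)
def Claim_changed_dutch_number_word : Prop := Dom_dutch_number_word (pvDiffWitness_dutch_number_word) ∧ Pre_dutch_number_word (pvDiffWitness_dutch_number_word) ∧ D_dutch_number_word (pvDiffWitness_dutch_number_word) ∧ dutch_number_word (pvDiffWitness_dutch_number_word) = pvDiffWitnessOut_dutch_number_word.1 ∧ dutch_number_word_alt (pvDiffWitness_dutch_number_word) = pvDiffWitnessOut_dutch_number_word.2 ∧ pvDiffWitnessOut_dutch_number_word.1 ≠ pvDiffWitnessOut_dutch_number_word.2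
def Claim_exact_dutch_number_word : Prop := ∀ (n : Int), Dom_dutch_number_word n → Pre_dutch_number_word n → D_dutch_number_word n → dutch_number_word n ≠ dutch_number_word_alt n

-- ===== LEMMAS AND PROOFS =====

lemma A_eq_small (n : Int) (h1 : 1 ≤ n) (h2 : n < 100) :
    dutch_number_word n = PySem.List.pyGetD smallB n "" := by
  interval_cases n <;> (rw [dutch_number_word.eq_def]; decide)

lemma A_eq_group (n : Int) (h1 : 1 ≤ n) (h2 : n < 1000) :
    dutch_number_word n = groupB n := by
  have hfd := PySem.Int.floordiv_eq_ediv_of_pos (a := n) (b := 100) (by norm_num)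
  have hfm := PySem.Int.floordiv_mul_add_mod n 100
  by_cases h : n < 100
  · have hq : PySem.Int.floordiv n 100 = 0 := by omega
    have hr : PySem.Int.mod n 100 = n := by omega
    rw [A_eq_small n h1 h]
    simp only [groupB, hq, hr]
    rw [if_pos trivial, if_neg (show ¬ n = 0 by omega), String.empty_append]
  · have hq1 : 1 ≤ PySem.Int.floordiv n 100 := by omega
    rw [dutch_number_word.eq_def]
    simp only [if_neg (show ¬ n = 0 by omega), if_neg (show ¬ n < 20 by omega),
      if_neg h, if_pos h2]
    unfold groupB
    simp only [if_neg (show ¬ PySem.Int.floordiv n 100 = 0 by omega)]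
    have hpfx : (if PySem.Int.floordiv n 100 = 1 then "" else PySem.List.pyGetD onesA (PySem.Int.floordiv n 100) "")
        = (if PySem.Int.floordiv n 100 = 1 then "" else PySem.List.pyGetD onesB (PySem.Int.floordiv n 100) "") := by
      rfl
    rw [hpfx]
    congr 1
    by_cases hr : PySem.Int.mod n 100 = 0
    · rw [if_neg (not_not_intro hr), if_pos hr]
    · have hr1 : 1 ≤ PySem.Int.mod n 100 := by
        have := PySem.Int.mod_nonneg n (b := 100) (by norm_num); omega
      have hr2 : PySem.Int.mod n 100 < 100 := PySem.Int.mod_lt n (b := 100) (by norm_num)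
      rw [if_pos hr, if_neg hr, A_eq_small _ hr1 hr2]

-- ===== VERDICT (by name: the statement is the Claim_ definition above) =====
theorem dutch_number_word_spec : Claim_unchanged_dutch_number_word := by
  intro n _ hpre hnd
  unfold Pre_dutch_number_word at hpre
  unfold D_dutch_number_word at hnd
  show dutch_number_word n = dutch_number_word_alt n
  have hn : 0 ≤ n := by
    by_contra h
    exact hnd ⟨hpre, by omega⟩
  unfold dutch_number_word_alt
  by_cases h0 : n = 0
  · subst h0; rw [dutch_number_word.eq_def]; rfl
  have hq0 := PySem.Int.mod_nonneg n (b := 1000) (by norm_num)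
  have hq1 := PySem.Int.mod_lt n (b := 1000) (by norm_num)
  have hfd := PySem.Int.floordiv_eq_ediv_of_pos (a := n) (b := 1000) (by norm_num)
  have hfm := PySem.Int.floordiv_mul_add_mod n 1000
  by_cases hbig : 1000000 ≤ n
  · rw [dutch_number_word.eq_def]
    simp only [if_neg h0, if_neg (show ¬ n < 20 by omega), if_neg (show ¬ n < 100 by omega),
      if_neg (show ¬ n < 1000 by omega), if_neg (show ¬ n < 1000000 by omega)]
    simp [hbig]
  by_cases hsm : n < 1000
  · have hq : PySem.Int.floordiv n 1000 = 0 := by omega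
    have hr : PySem.Int.mod n 1000 = n := by omega
    simp only [if_neg h0, if_neg (show ¬ (n < 0 ∨ 1000000 ≤ n) by omega), hq, hr,
      if_pos rfl, if_neg h0]
    rw [A_eq_group n (by omega) hsm]
    simp [String.empty_append]
  · -- 1000 ≤ n < 1000000
    rw [dutch_number_word.eq_def]
    have hq1' : 1 ≤ PySem.Int.floordiv n 1000 := by omega
    have hq2' : PySem.Int.floordiv n 1000 < 1000 := by omega
    simp only [if_neg h0, if_neg (show ¬ n < 20 by omega), if_neg (show ¬ n < 100 by omega),
      if_neg (show ¬ n < 1000 by omega), if_pos (show n < 1000000 by omega),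
      if_neg (show ¬ (n < 0 ∨ 1000000 ≤ n) by omega),
      if_neg (show ¬ PySem.Int.floordiv n 1000 = 0 by omega)]
    have hpfx : (if PySem.Int.floordiv n 1000 = 1 then "" else dutch_number_word (PySem.Int.floordiv n 1000))
        = (if PySem.Int.floordiv n 1000 = 1 then "" else groupB (PySem.Int.floordiv n 1000)) := by
      split_ifs with h1
      · rfl
      · exact A_eq_group _ (by omega) (by omega)
    rw [hpfx]
    congr 1
    by_cases hr : PySem.Int.mod n 1000 = 0
    · rw [if_neg (not_not_intro hr), if_pos hr]
    · rw [if_pos hr, if_neg hr, A_eq_group _ (by omega) (by omega)]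

theorem dutch_number_word_changed : Claim_changed_dutch_number_word := by
  unfold Claim_changed_dutch_number_word pvDiffWitness_dutch_number_word
  refine ⟨by decide, by decide, by decide, ?_, by decide, by decide⟩
  rw [dutch_number_word.eq_def]; decide

theorem dutch_number_word_tight : Claim_exact_dutch_number_word := by
  intro n _ _ hd
  unfold D_dutch_number_word at hd
  obtain ⟨h1, h2⟩ := hd
  interval_cases n <;> (rw [dutch_number_word.eq_def]; decide)
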